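-- pv_equiv track=rewrite | github.com/sevenseablue/leetcode | src/leet/shanruifeng-find-miss.py | findMiss
-- ===== SOURCE A (Python) =====
-- def findMiss(arr):
--     l, r = 0, len(arr)-1
--     while l<=r:
--         mid = (l+r)>>1
--         if mid == 0:
--             return arr[0] + 1
--         if arr[mid] != arr[mid-1]+1:
--             return arr[mid-1] + 1
--         elif arr[mid]>arr[0]+mid:
--             r = mid-1
--         else:
--             l = mid+1
-- ===== SOURCE B (Python) =====
-- def findMiss(arr):
--     # Same binary search, but recursive over (base, size) intervals instead of a (l, r) loop.
--     def go(base, n):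
--         if n == 0:
--             return None
--         half = (n - 1) // 2
--         mid = base + half
--         if mid == 0:
--             return arr[0] + 1
--         if arr[mid] != arr[mid - 1] + 1:
--             return arr[mid - 1] + 1
--         if arr[mid] > arr[0] + mid:
--             return go(base, half)
--         return go(mid + 1, n - 1 - half)
--     return go(0, len(arr))
-- ===== Notes on version B (the rewrite author's own statement) =====
-- stated objective: alternative
-- what changed: The while-loop over (l, r) endpoint state is replaced by a recursion over (base, size) intervals, with the same midpoint and comparisons, so the identical binary-search path is taken.
import Mathlib
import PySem

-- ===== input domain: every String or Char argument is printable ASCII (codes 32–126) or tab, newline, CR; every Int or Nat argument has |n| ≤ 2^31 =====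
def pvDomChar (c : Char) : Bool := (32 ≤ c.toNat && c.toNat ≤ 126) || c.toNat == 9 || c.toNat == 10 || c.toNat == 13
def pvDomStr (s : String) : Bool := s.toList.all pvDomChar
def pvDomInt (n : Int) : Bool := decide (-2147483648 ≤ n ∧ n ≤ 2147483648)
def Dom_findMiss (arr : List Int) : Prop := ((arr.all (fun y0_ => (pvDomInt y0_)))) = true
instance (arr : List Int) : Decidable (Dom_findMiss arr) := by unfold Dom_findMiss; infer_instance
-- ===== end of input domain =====

-- B re-expresses A's (l, r)-loop binary search as a recursion over (base, size) intervals; objective: alternative decomposition, same cost.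

-- ===== PORT A =====
-- the two decreasing-measure facts for the loop, cited by name in findMissLoop's decreasing_by
theorem pvDecL (l r : Int) (h : l ≤ r) :
    (PySem.Int.floordiv (l + r) 2 - 1 - l + 1).toNat < (r - l + 1).toNat := by
  have hb := PySem.Int.floordiv_two_mid_bounds h
  rw [sub_right_comm, sub_add_cancel]
  exact (Int.toNat_lt_toNat (lt_of_le_of_lt (sub_nonneg.mpr h) (lt_add_one _))).mpr
    (lt_of_le_of_lt (sub_le_sub_right hb.2 l) (lt_add_one _))

theorem pvDecR (l r : Int) (h : l ≤ r) :
    (r - (PySem.Int.floordiv (l + r) 2 + 1) + 1).toNat < (r - l + 1).toNat := by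
  have hb := PySem.Int.floordiv_two_mid_bounds h
  rw [sub_add_eq_sub_sub, sub_add_cancel]
  exact (Int.toNat_lt_toNat (lt_of_le_of_lt (sub_nonneg.mpr h) (lt_add_one _))).mpr
    (lt_of_le_of_lt (sub_le_sub_left hb.1 r) (lt_add_one _))

-- the while loop of A as recursion on state (l, r); Python's `(l+r)>>1` is exactly floor division by 2.
-- all list indices reached from findMiss's entry call are in range, so pyGetD's default is never used.
def findMissLoop (arr : List Int) (l r : Int) : Option Int :=
  if h : l ≤ r then
    let mid := PySem.Int.floordiv (l + r) 2
    if mid = 0 then some (PySem.List.pyGetD arr 0 0 + 1)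
    else if PySem.List.pyGetD arr mid 0 ≠ PySem.List.pyGetD arr (mid - 1) 0 + 1 then
      some (PySem.List.pyGetD arr (mid - 1) 0 + 1)
    else if PySem.List.pyGetD arr mid 0 > PySem.List.pyGetD arr 0 0 + mid then
      findMissLoop arr l (mid - 1)
    else
      findMissLoop arr (mid + 1) r
  else none
termination_by (r - l + 1).toNat
decreasing_by
  · exact pvDecL l r h
  · exact pvDecR l r h

def findMiss (arr : List Int) : Option Int :=
  findMissLoop arr 0 ((arr.length : Int) - 1)

-- ===== PORT B =====
-- recursion over the interval [base, base+n) given by start and size; `(n-1)//2` on n ≥ 1 is Nat division.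
def findMissGo (arr : List Int) (base : Int) : Nat → Option Int
  | 0 => none
  | m + 1 =>
    let half := m / 2
    let mid := base + (half : Int)
    if mid = 0 then some (PySem.List.pyGetD arr 0 0 + 1)
    else if PySem.List.pyGetD arr mid 0 ≠ PySem.List.pyGetD arr (mid - 1) 0 + 1 then
      some (PySem.List.pyGetD arr (mid - 1) 0 + 1)
    else if PySem.List.pyGetD arr mid 0 > PySem.List.pyGetD arr 0 0 + mid then
      findMissGo arr base half
    else
      findMissGo arr (mid + 1) (m - half)
termination_by n => n
decreasing_by
  · exact Nat.lt_succ_of_le (Nat.div_le_self m 2)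
  · exact Nat.lt_succ_of_le (Nat.sub_le m (m / 2))

def findMiss_alt (arr : List Int) : Option Int :=
  findMissGo arr 0 arr.length

-- ===== PRECONDITION & SPEC =====
def Spec_findMiss (arr : List Int) (out : Option Int) : Prop := out = findMiss_alt arr
instance (arr : List Int) (out : Option Int) : Decidable (Spec_findMiss arr out) := by unfold Spec_findMiss; infer_instance

-- ===== CLAIM (what is proved, stated in full; the proofs are below) =====
def Claim_equal_findMiss : Prop := ∀ (arr : List Int), Dom_findMiss arr → Spec_findMiss arr (findMiss arr)

-- ===== LEMMAS AND PROOFS =====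
-- The loop on [base, base+n-1] computes exactly the recursion on (base, n).
theorem loop_eq_go (arr : List Int) (n : Nat) (base : Int) :
    findMissLoop arr base (base + (n : Int) - 1) = findMissGo arr base n := by
  induction n using Nat.strong_induction_on generalizing base with
  | _ n ih =>
    match n with
    | 0 =>
      rw [findMissLoop, findMissGo]
      simp
    | m + 1 =>
      rw [findMissLoop, findMissGo]
      have hle : base ≤ base + ((m : Int) + 1) - 1 := by omega
      have hmid : PySem.Int.floordiv (base + (base + ((m : Int) + 1) - 1)) 2
          = base + ((m / 2 : Nat) : Int) := by
        rw [PySem.Int.floordiv_eq_ediv_of_pos (by omega)]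
        omega
      simp only [Nat.cast_add, Nat.cast_one] at hmid ⊢
      rw [dif_pos hle, hmid]
      split_ifs with h1 h2 h3
      · rfl
      · rfl
      · have := ih (m / 2) (by omega) base
        simpa using this
      · have := ih (m - m / 2) (by omega) (base + ((m / 2 : Nat) : Int) + 1)
        have harg : base + ((m / 2 : Nat) : Int) + 1 + ((m - m / 2 : Nat) : Int) - 1
            = base + ((m : Int) + 1) - 1 := by
          have : ((m - m / 2 : Nat) : Int) = (m : Int) - ((m / 2 : Nat) : Int) := by omega
          omega
        rw [harg] at this
        simpa using this

-- ===== VERDICT (by name: the statement is the Claim_ definition above) =====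
theorem findMiss_spec : Claim_equal_findMiss := by
  intro arr _
  unfold Spec_findMiss findMiss findMiss_alt
  have := loop_eq_go arr arr.length 0
  simpa using this
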